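-- pv_equiv track=rewrite | github.com/tsukuro19/Algorithm-Exercise | Hackerrank/Algorithm/Implementation/Flatland Space Stations.py | Space_station
-- ===== SOURCE A (Python) =====
-- def Space_station(city_amount,spaces):
--     spaces.sort()
--     max_distance=max(0,spaces[0]-0)
--     for i in range(1,len(spaces)):
--         #This value represents the number of cities between these two space stations.
--         distance=(spaces[i]-spaces[i-1])//2
--         max_distance=max(max_distance,distance)
--     max_distance=max(max_distance,city_amount-1-spaces[-1])
--     return max_distance
-- ===== SOURCE B (Python) =====
-- def Space_station(city_amount, spaces):
--     # Binary search on the answer: find the least d >= 0 such that every city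
--     # 0..city_amount-1 is within d of some station (coverage decision), instead
--     # of directly computing the maximum of edge distances and halved gaps.
--     spaces.sort()
--
--     def covered(d):
--         # stations' radius-d intervals reach city 0, reach city n-1,
--         # and consecutive intervals leave no uncovered city between them
--         return (spaces[0] <= d
--                 and city_amount - 1 - spaces[-1] <= d
--                 and all(b - a <= 2 * d + 1 for a, b in zip(spaces, spaces[1:])))
--
--     lo = 0
--     hi = max(0, spaces[0], city_amount - 1 - spaces[-1], spaces[-1] - spaces[0])
--     while lo < hi:
--         mid = (lo + hi) // 2
--         if covered(mid):
--             hi = mid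
--         else:
--             lo = mid + 1
--     return lo
-- ===== Notes on version B (the rewrite author's own statement) =====
-- stated objective: alternative
-- what changed: B replaces A's direct computation (max of first-station distance, halved adjacent gaps, and last boundary) with a binary search for the least d >= 0 such that radius-d station intervals cover every city, deciding coverage per candidate d; the least feasible d equals A's maximum.
import Mathlib
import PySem

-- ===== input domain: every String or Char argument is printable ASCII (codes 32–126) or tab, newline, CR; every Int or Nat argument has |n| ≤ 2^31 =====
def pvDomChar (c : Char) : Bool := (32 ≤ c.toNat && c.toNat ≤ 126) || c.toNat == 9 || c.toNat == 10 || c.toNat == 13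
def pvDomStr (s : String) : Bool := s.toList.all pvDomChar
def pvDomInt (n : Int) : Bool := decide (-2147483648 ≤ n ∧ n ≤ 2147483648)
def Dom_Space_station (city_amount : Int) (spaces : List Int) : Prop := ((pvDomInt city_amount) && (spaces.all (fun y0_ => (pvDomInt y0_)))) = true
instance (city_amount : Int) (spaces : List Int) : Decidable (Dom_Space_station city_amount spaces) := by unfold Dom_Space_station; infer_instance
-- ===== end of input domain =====

-- B binary-searches for the least d >= 0 whose radius-d station intervals cover
-- every city, instead of computing A's max of edge distances and halved gaps;
-- equivalence is about the return value (both sort `spaces` in place).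

-- ===== PORT A =====
def Space_station (city_amount : Int) (spaces : List Int) : Int :=
  let s := PySem.List.sorted spaces (fun x => x) false
  let m0 := max 0 (PySem.List.pyGetD s 0 0 - 0)
  let m1 := (PySem.List.pyRange 1 (s.length : Int) 1).foldl
      (fun m i => max m (PySem.Int.floordiv (PySem.List.pyGetD s i 0 - PySem.List.pyGetD s (i - 1) 0) 2)) m0
  max m1 (city_amount - 1 - PySem.List.pyGetD s (-1) 0)

-- ===== PORT B =====
-- `covered(d)` of Source B
def ssCovered (city_amount : Int) (s : List Int) (d : Int) : Bool :=
  decide (PySem.List.pyGetD s 0 0 ≤ d) &&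
  decide (city_amount - 1 - PySem.List.pyGetD s (-1) 0 ≤ d) &&
  (s.zip (s.drop 1)).all (fun p => decide (p.2 - p.1 ≤ 2 * d + 1))

-- the `while lo < hi` binary-search loop of Source B
def ssSearch (city_amount : Int) (s : List Int) (lo hi : Int) : Int :=
  if h : lo < hi then
    let mid := PySem.Int.floordiv (lo + hi) 2
    if ssCovered city_amount s mid then ssSearch city_amount s lo mid
    else ssSearch city_amount s (mid + 1) hi
  else lo
termination_by (hi - lo).toNat
decreasing_by
  · simp only [PySem.Int.floordiv_eq_ediv_of_pos (by omega : (0:Int) < 2)] at *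
    omega
  · simp only [PySem.Int.floordiv_eq_ediv_of_pos (by omega : (0:Int) < 2)] at *
    omega

def Space_station_alt (city_amount : Int) (spaces : List Int) : Int :=
  let s := PySem.List.sorted spaces (fun x => x) false
  let hi := max (max (max 0 (PySem.List.pyGetD s 0 0))
                     (city_amount - 1 - PySem.List.pyGetD s (-1) 0))
                (PySem.List.pyGetD s (-1) 0 - PySem.List.pyGetD s 0 0)
  ssSearch city_amount s 0 hi

-- ===== PRECONDITION & SPEC =====
-- Pre_ excludes the empty station list, on which both A and B raise IndexError.
def Pre_Space_station (city_amount : Int) (spaces : List Int) : Prop := spaces ≠ []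
instance (city_amount : Int) (spaces : List Int) : Decidable (Pre_Space_station city_amount spaces) := by unfold Pre_Space_station; infer_instance
def pvWitness_Space_station : Int × List Int := (5, [0, 4])

def Spec_Space_station (city_amount : Int) (spaces : List Int) (out : Int) : Prop := out = Space_station_alt city_amount spaces
instance (city_amount : Int) (spaces : List Int) (out : Int) : Decidable (Spec_Space_station city_amount spaces out) := by unfold Spec_Space_station; infer_instance

-- ===== CLAIM (what is proved, stated in full; the proofs are below) =====
def Claim_equal_Space_station : Prop := ∀ (city_amount : Int) (spaces : List Int), Dom_Space_station city_amount spaces → Pre_Space_station city_amount spaces → Spec_Space_station city_amount spaces (Space_station city_amount spaces)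

-- ===== LEMMAS AND PROOFS =====

-- a fold of running maxes is ≤ d iff the seed and every mapped element are
theorem foldmax_le {A : Type} (f : A → Int) (l : List A) (a d : Int) :
    l.foldl (fun m x => max m (f x)) a ≤ d ↔ a ≤ d ∧ ∀ x ∈ l, f x ≤ d := by
  induction l generalizing a with
  | nil => simp
  | cons y l ih =>
      simp only [List.foldl_cons, ih, max_le_iff, List.mem_cons]
      constructor
      · rintro ⟨⟨h1, h2⟩, h3⟩
        refine ⟨h1, fun x hx => ?_⟩
        rcases hx with rfl | hx
        · exact h2
        · exact h3 x hx
      · rintro ⟨h1, h2⟩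
        exact ⟨⟨h1, h2 y (Or.inl rfl)⟩, fun x hx => h2 x (Or.inr hx)⟩

-- the seed never exceeds the running max
theorem le_foldmax {A : Type} (f : A → Int) (l : List A) (a : Int) :
    a ≤ l.foldl (fun m x => max m (f x)) a := by
  induction l generalizing a with
  | nil => simp
  | cons y l ih => exact le_trans (le_max_left a (f y)) (ih (max a (f y)))

-- gap//2 ≤ d ⟺ gap ≤ 2d+1
theorem fdiv2_le_iff (g d : Int) : PySem.Int.floordiv g 2 ≤ d ↔ g ≤ 2 * d + 1 := by
  rw [PySem.Int.floordiv_eq_ediv_of_pos (by omega : (0:Int) < 2)]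
  omega

-- A's indexed gap list equals the zip gap list used by covered()
theorem gaps_eq (s : List Int) :
    (PySem.List.pyRange 1 (s.length : Int) 1).map
        (fun i => PySem.List.pyGetD s i 0 - PySem.List.pyGetD s (i - 1) 0)
      = (s.zip (s.drop 1)).map (fun p => p.2 - p.1) := by
  apply List.ext_getElem
  · simp only [List.length_map, PySem.List.length_pyRange_one, List.length_zip, List.length_drop]
    omega
  · intro k h1 h2
    have hk : k + 1 < s.length := by
      simp only [List.length_map, PySem.List.length_pyRange_one] at h1; omega
    simp only [List.getElem_map, PySem.List.getElem_pyRange_one, List.getElem_zip,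
      List.getElem_drop]
    rw [show (1 : Int) + (k : Int) = ((k + 1 : Nat) : Int) by push_cast; ring]
    rw [PySem.List.pyGetD_natCast]
    rw [show ((k + 1 : Nat) : Int) - 1 = ((k : Nat) : Int) by push_cast; ring,
        PySem.List.pyGetD_natCast]
    rw [List.getD_eq_getElem s 0 hk, List.getD_eq_getElem s 0 (by omega : k < s.length)]
    simp only [show (1:Nat)+k = k+1 from by omega]

-- covered(d) decides "A's value ≤ d" for d ≥ 0
theorem covered_iff (n : Int) (sp : List Int) (d : Int) (hd : 0 ≤ d) :
    ssCovered n (PySem.List.sorted sp (fun x => x) false) d = true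
      ↔ Space_station n sp ≤ d := by
  set s := PySem.List.sorted sp (fun x => x) false with hs
  unfold ssCovered Space_station
  simp only [← hs, sub_zero, Bool.and_eq_true, decide_eq_true_eq, List.all_eq_true,
    max_le_iff]
  rw [show (fun m i => max m (PySem.Int.floordiv (PySem.List.pyGetD s i 0 - PySem.List.pyGetD s (i - 1) 0) 2))
      = (fun m i => max m ((fun i => PySem.Int.floordiv (PySem.List.pyGetD s i 0 - PySem.List.pyGetD s (i - 1) 0) 2) i)) from rfl]
  rw [foldmax_le]
  constructor
  · rintro ⟨⟨h0, hlast⟩, hgaps⟩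
    refine ⟨⟨by omega, fun i hi => ?_⟩, hlast⟩
    have : PySem.List.pyGetD s i 0 - PySem.List.pyGetD s (i - 1) 0
        ∈ (s.zip (s.drop 1)).map (fun p => p.2 - p.1) := by
      rw [← gaps_eq]; exact List.mem_map_of_mem hi
    rcases List.mem_map.mp this with ⟨p, hp, he⟩
    rw [fdiv2_le_iff]
    rw [show PySem.List.pyGetD s i 0 - PySem.List.pyGetD s (i - 1) 0 = p.2 - p.1 from he.symm]
    exact hgaps p hp
  · rintro ⟨⟨h0d, hgaps⟩, hlast⟩
    refine ⟨⟨?_, hlast⟩, fun p hp => ?_⟩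
    · omega
    · have : p.2 - p.1 ∈ (PySem.List.pyRange 1 (s.length : Int) 1).map
          (fun i => PySem.List.pyGetD s i 0 - PySem.List.pyGetD s (i - 1) 0) := by
        rw [gaps_eq]; exact List.mem_map_of_mem hp
      rcases List.mem_map.mp this with ⟨i, hi, he⟩
      have := hgaps i hi
      rw [fdiv2_le_iff] at this
      omega

-- pyGetD at 0 and -1 on a nonempty list are the first and last elements
theorem pyGetD_head (s : List Int) (h : s ≠ []) :
    PySem.List.pyGetD s 0 0 = s[0]'(List.length_pos_iff.mpr h) := by
  have hl : 0 < s.length := List.length_pos_iff.mpr h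
  rw [PySem.List.pyGetD_eq_getElem s 0 (by omega) (by exact_mod_cast hl)]
  simp

theorem pyGetD_last (s : List Int) (h : s ≠ []) :
    PySem.List.pyGetD s (-1) 0 = s[s.length - 1]'(by have := List.length_pos_iff.mpr h; omega) := by
  have hl : 0 < s.length := List.length_pos_iff.mpr h
  simp only [PySem.List.pyGetD, PySem.List.pyGet?, PySem.List.pyIdx?]
  rw [if_neg (by omega), if_pos (show -(s.length:Int) ≤ -1 by omega)]
  rw [show ((-(-1:Int)).toNat) = 1 by norm_num]
  simp only [Option.bind_some]
  rw [List.getElem?_eq_getElem (show s.length - 1 < s.length by omega)]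
  rfl

-- a pair of the zip with drop 1 is an adjacent pair
theorem zip_adjacent (s : List Int) (p : Int × Int) (hp : p ∈ s.zip (s.drop 1)) :
    ∃ k, ∃ _ : k + 1 < s.length, p.1 = s[k] ∧ p.2 = s[k + 1] := by
  rcases List.mem_iff_getElem.mp hp with ⟨k, hk, he⟩
  have hk' : k + 1 < s.length := by
    simp only [List.length_zip, List.length_drop] at hk; omega
  refine ⟨k, hk', ?_, ?_⟩
  · rw [← he, List.getElem_zip]
  · rw [← he, List.getElem_zip]
    simp only [List.getElem_drop]
    congr 1; omega

-- in a pairwise-≤ list, earlier elements are ≤ later ones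
theorem pairwise_le_getElem (s : List Int) (hpair : s.Pairwise (fun a b => a ≤ b))
    {i j : Nat} (hi : i < s.length) (hj : j < s.length) (hij : i ≤ j) : s[i] ≤ s[j] := by
  rcases Nat.lt_or_ge i j with h | h
  · exact List.pairwise_iff_getElem.mp hpair i j hi hj h
  · have : i = j := by omega
    subst this; exact le_refl _

-- the binary search returns t when lo ≤ t ≤ hi and covered decides t-below
theorem ssSearch_eq (n : Int) (sp : List Int) (t : Int) (ht : 0 ≤ t)
    (hA : t = Space_station n sp) :
    ∀ lo hi, 0 ≤ lo → lo ≤ t → t ≤ hi →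
      ssSearch n (PySem.List.sorted sp (fun x => x) false) lo hi = t := by
  intro lo hi
  induction lo, hi using ssSearch.induct n (PySem.List.sorted sp (fun x => x) false) with
  | case1 lo hi h mid hc ih =>
      intro h0 hlo hhi
      rw [ssSearch, dif_pos h, if_pos hc]
      have hmid0 : 0 ≤ mid := by
        simp only [mid, PySem.Int.floordiv_eq_ediv_of_pos (by omega : (0:Int) < 2)]; omega
      have := (covered_iff n sp mid hmid0).mp hc
      exact ih h0 hlo (by omega)
  | case2 lo hi h mid hc ih =>
      intro h0 hlo hhi
      rw [ssSearch, dif_pos h, if_neg hc]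
      have hmid0 : 0 ≤ mid := by
        simp only [mid, PySem.Int.floordiv_eq_ediv_of_pos (by omega : (0:Int) < 2)]; omega
      have : ¬ Space_station n sp ≤ mid := fun hle =>
        hc ((covered_iff n sp mid hmid0).mpr (by omega))
      exact ih (by omega) (by omega) hhi
  | case3 lo hi h =>
      intro h0 hlo hhi
      rw [ssSearch, dif_neg h]
      omega

-- ===== VERDICT (by name: the statement is the Claim_ definition above) =====
theorem Space_station_spec : Claim_equal_Space_station := by
  intro n sp _ hpre
  unfold Spec_Space_station Space_station_alt
  set s := PySem.List.sorted sp (fun x => x) false with hs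
  set t := Space_station n sp with htdef
  have hne : s ≠ [] := by
    intro h
    apply hpre
    have := PySem.List.length_sorted sp (fun x => x) false
    rw [← hs, h] at this
    exact List.eq_nil_of_length_eq_zero (by simpa using this.symm)
  have hlen : 0 < s.length := List.length_pos_iff.mpr hne
  have hpair : s.Pairwise (fun a b => a ≤ b) := by
    rw [hs]; exact PySem.List.sorted_pairwise sp (fun x => x)
  -- t ≥ 0
  have ht0 : 0 ≤ t := by
    rw [htdef]; unfold Space_station
    simp only [← hs, sub_zero]
    have h1 := le_foldmax
      (fun i => PySem.Int.floordiv (PySem.List.pyGetD s i 0 - PySem.List.pyGetD s (i - 1) 0) 2)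
      (PySem.List.pyRange 1 (s.length : Int) 1) (max 0 (PySem.List.pyGetD s 0 0))
    have h2 : (0:Int) ≤ max 0 (PySem.List.pyGetD s 0 0) := le_max_left _ _
    exact le_trans (le_trans h2 h1) (le_max_left _ _)
  -- t ≤ the initial hi
  have hhi : t ≤ max (max (max 0 (PySem.List.pyGetD s 0 0))
                     (n - 1 - PySem.List.pyGetD s (-1) 0))
                (PySem.List.pyGetD s (-1) 0 - PySem.List.pyGetD s 0 0) := by
    rw [htdef]; unfold Space_station
    simp only [← hs, sub_zero, max_le_iff]
    rw [show (fun m i => max m (PySem.Int.floordiv (PySem.List.pyGetD s i 0 - PySem.List.pyGetD s (i - 1) 0) 2))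
        = (fun m i => max m ((fun i => PySem.Int.floordiv (PySem.List.pyGetD s i 0 - PySem.List.pyGetD s (i - 1) 0) 2) i)) from rfl]
    rw [foldmax_le]
    refine ⟨⟨by omega, fun i hi => ?_⟩, by omega⟩
    have hmem : PySem.List.pyGetD s i 0 - PySem.List.pyGetD s (i - 1) 0
        ∈ (s.zip (s.drop 1)).map (fun p => p.2 - p.1) := by
      rw [← gaps_eq]; exact List.mem_map_of_mem hi
    rcases List.mem_map.mp hmem with ⟨p, hp, he⟩
    rcases zip_adjacent s p hp with ⟨k, hk, h1, h2⟩
    have hget0 := pyGetD_head s hne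
    have hgetl := pyGetD_last s hne
    have hle1 : PySem.List.pyGetD s 0 0 ≤ p.1 := by
      rw [hget0, h1]; exact pairwise_le_getElem s hpair (by omega) (by omega) (by omega)
    have hle2 : p.2 ≤ PySem.List.pyGetD s (-1) 0 := by
      rw [hgetl, h2]; exact pairwise_le_getElem s hpair (by omega) (by omega) (by omega)
    have hij : p.1 ≤ p.2 := by
      rw [h1, h2]; exact pairwise_le_getElem s hpair (by omega) (by omega) (by omega)
    have hd2 : PySem.Int.floordiv (p.2 - p.1) 2 ≤ p.2 - p.1 := by
      rw [PySem.Int.floordiv_eq_ediv_of_pos (by omega : (0:Int) < 2)]; omega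
    rw [← he]
    omega
  exact (ssSearch_eq n sp t ht0 htdef 0
    (max (max (max 0 (PySem.List.pyGetD s 0 0)) (n - 1 - PySem.List.pyGetD s (-1) 0))
         (PySem.List.pyGetD s (-1) 0 - PySem.List.pyGetD s 0 0))
    (by omega) ht0 hhi).symm
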